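-- pv_equiv track=rewrite | github.com/wtworden/TNorm | tnorm/x3d_to_html.py | fix_x3d_str
-- ===== SOURCE A (Python) =====
-- def fix_x3d_str(x3d_str):
--     x3d_str = x3d_str.replace('\n','')
--     x3d_split = x3d_str.split('>')
--     x3d_tags = []
--     for string in x3d_split:
--         split_str = string.split('<')
--         for ss in split_str:
--             if ss.replace(' ','') != '':
--                 x3d_tags.append(ss)
--     x3d_str = ''
--     for tag in x3d_tags:
--         if tag[-1] == '/':
--             tag_name = tag.split(' ')[0]
--             formatted_tag = '<'+tag[:-1]+'></{}>'.format(tag_name)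
--         else:
--             formatted_tag = '<'+tag+'>'
--         x3d_str += formatted_tag
--     return x3d_str
-- ===== SOURCE B (Python) =====
-- def _flush(tok):
--     # format-and-emit one token (same space-only filter and tag rules as the spec)
--     if tok.replace(' ', '') == '':
--         return ''
--     if tok.endswith('/'):
--         return '<' + tok[:-1] + '></' + tok.split(' ', 1)[0] + '>'
--     return '<' + tok + '>'
--
--
-- def fix_x3d_str(x3d_str):
--     x3d_str = x3d_str.replace('\n', '')
--     out = ''
--     tok = ''
--     for c in x3d_str:
--         if c == '<' or c == '>':
--             out += _flush(tok)
--             tok = ''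
--         else:
--             tok += c
--     return out + _flush(tok)
-- ===== Notes on version B (the rewrite author's own statement) =====
-- stated objective: simpler
-- what changed: The nested two-level split-based tokenizer with a separate token list and a second formatting loop is replaced by a single character scan that accumulates the current token and flushes it, already formatted, at every angle-bracket delimiter.
import Mathlib
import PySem

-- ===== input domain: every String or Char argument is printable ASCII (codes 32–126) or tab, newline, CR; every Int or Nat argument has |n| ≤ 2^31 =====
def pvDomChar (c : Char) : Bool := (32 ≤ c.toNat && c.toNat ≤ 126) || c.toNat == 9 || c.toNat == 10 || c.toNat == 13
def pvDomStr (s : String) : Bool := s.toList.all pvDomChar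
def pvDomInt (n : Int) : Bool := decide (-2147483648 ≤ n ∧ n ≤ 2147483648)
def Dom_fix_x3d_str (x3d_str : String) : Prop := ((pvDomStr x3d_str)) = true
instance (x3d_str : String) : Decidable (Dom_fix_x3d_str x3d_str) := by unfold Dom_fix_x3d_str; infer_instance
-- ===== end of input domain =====

-- B replaces A's nested two-level split tokenizer + second formatting loop by a single
-- character scan that flushes each token, already formatted, at every angle-bracket delimiter (simpler).


-- ===== PORT A =====
-- the filter 'ss.replace(' ','') != ''' (textually identical in both Pythons)
def pvKeep (ss : List Char) : Bool := decide (PySem.Chars.replace ss [' '] [] ≠ [])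

-- "if tag[-1]=='/': '<'+tag[:-1]+'></{}>'.format(tag.split(' ')[0]) else '<'+tag+'>'"
-- tag.split(' ')[0]: split is never empty, so the [0] index is the head
def fmtA (tag : List Char) : List Char :=
  if PySem.List.pyGet? tag (-1) = some '/' then
    let tag_name := (PySem.Chars.splitOn tag [' ']).headD []
    ['<'] ++ PySem.List.slice tag none (some (-1)) ++ ['>', '<', '/'] ++ tag_name ++ ['>']
  else ['<'] ++ tag ++ ['>']

def fix_x3d_str (x3d_str : String) : String :=
  -- x3d_str = x3d_str.replace('\n','')
  let cs := PySem.Chars.replace x3d_str.toList ['\n'] []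
  -- nested loops: for string in cs.split('>'): for ss in string.split('<'): if keep: append
  let x3d_tags :=
    (PySem.Chars.splitOn cs ['>']).foldl
      (fun acc string =>
        (PySem.Chars.splitOn string ['<']).foldl
          (fun acc2 ss => if pvKeep ss then acc2 ++ [ss] else acc2) acc)
      []
  -- x3d_str = ''; for tag in x3d_tags: x3d_str += formatted_tag
  String.ofList (x3d_tags.foldl (fun out tag => out ++ fmtA tag) [])

-- ===== PORT B =====
-- _flush(tok): tok.endswith('/'); tok[:-1] = dropLast; tok.split(' ',1)[0] = prefix before first ' '
def flushB (tok : List Char) : List Char :=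
  if pvKeep tok then
    if PySem.Chars.endswith tok ['/'] then
      ['<'] ++ tok.dropLast ++ ['>', '<', '/'] ++ tok.takeWhile (· ≠ ' ') ++ ['>']
    else ['<'] ++ tok ++ ['>']
  else []

-- the single scan: flush at '<' or '>', otherwise extend the current token
def scanB : List Char → List Char → List Char → List Char
  | [], tok, out => out ++ flushB tok
  | c :: rest, tok, out =>
    if c = '<' ∨ c = '>' then scanB rest [] (out ++ flushB tok)
    else scanB rest (tok ++ [c]) out

def fix_x3d_str_alt (x3d_str : String) : String :=
  String.ofList (scanB (PySem.Chars.replace x3d_str.toList ['\n'] []) [] [])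

-- ===== PRECONDITION & SPEC =====
def Spec_fix_x3d_str (x3d_str : String) (out : String) : Prop := out = fix_x3d_str_alt x3d_str
instance (x3d_str : String) (out : String) : Decidable (Spec_fix_x3d_str x3d_str out) := by unfold Spec_fix_x3d_str; infer_instance

-- ===== CLAIM (what is proved, stated in full; the proofs are below) =====
def Claim_equal_fix_x3d_str : Prop := ∀ (x3d_str : String), Dom_fix_x3d_str x3d_str → Spec_fix_x3d_str x3d_str (fix_x3d_str x3d_str)

-- ===== LEMMAS AND PROOFS =====

-- structural single-char splitter (proof-side model of Python's str.split on one char)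
def splitC (d : Char) : List Char → List (List Char)
  | [] => [[]]
  | c :: t => if c = d then [] :: splitC d t else (splitC d t).modifyHead (c :: ·)

-- split on either delimiter (proof-side model of the token stream)
def splitD : List Char → List (List Char)
  | [] => [[]]
  | c :: t => if c = '<' ∨ c = '>' then [] :: splitD t else (splitD t).modifyHead (c :: ·)

theorem splitC_ne_nil (d : Char) (l : List Char) : splitC d l ≠ [] := by
  induction l with
  | nil => simp [splitC]
  | cons c t ih =>
    simp only [splitC]
    split_ifs
    · simp
    · cases h : splitC d t with
      | nil => exact absurd h ih
      | cons a b => simp [h]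

theorem splitD_ne_nil (l : List Char) : splitD l ≠ [] := by
  induction l with
  | nil => simp [splitD]
  | cons c t ih =>
    simp only [splitD]
    split_ifs
    · simp
    · cases h : splitD t with
      | nil => exact absurd h ih
      | cons a b => simp [h]


theorem modifyHead_append_left {α : Type} (f : α → α) (x y : List α) (h : x ≠ []) :
    (x ++ y).modifyHead f = x.modifyHead f ++ y := by
  cases x with
  | nil => exact absurd rfl h
  | cons a b => simp [List.modifyHead]

theorem splitOn_go_spec (d : Char) :
    ∀ (fuel : Nat) (l cur : List Char) (acc : List (List Char)), l.length ≤ fuel →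
      PySem.Chars.splitOn.go [d] fuel l cur acc
        = acc.reverse ++ (splitC d l).modifyHead (cur.reverse ++ ·) := by
  intro fuel
  induction fuel with
  | zero =>
    intro l cur acc h
    have : l = [] := List.eq_nil_of_length_eq_zero (Nat.le_zero.mp h)
    subst this
    simp [PySem.Chars.splitOn.go, splitC]
  | succ f ih =>
    intro l cur acc h
    cases l with
    | nil => simp [PySem.Chars.splitOn.go, splitC]
    | cons c rest =>
      simp only [PySem.Chars.splitOn.go]
      by_cases hc : c = d
      · subst hc
        have hp : [c].isPrefixOf (c :: rest) = true := by simp [List.isPrefixOf]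
        rw [if_pos hp]
        simp only [List.length_cons, List.length_nil, List.drop_succ_cons, List.drop_zero]
        rw [ih rest [] _ (by simpa using Nat.le_of_succ_le_succ h)]
        cases hsr : splitC c rest with
        | nil => exact absurd hsr (splitC_ne_nil c rest)
        | cons a b => simp [splitC, hsr, List.modifyHead]
      · have hp : [d].isPrefixOf (c :: rest) = false := by
          simp only [List.isPrefixOf, List.isPrefixOf_nil_left, Bool.and_true]
          exact beq_false_of_ne (fun (he : d = c) => hc he.symm)
        rw [if_neg (by simp [hp])]
        rw [ih rest (c :: cur) acc (by simpa using Nat.le_of_succ_le_succ h)]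
        have hne := splitC_ne_nil d rest
        cases hs : splitC d rest with
        | nil => exact absurd hs hne
        | cons a b =>
          simp [splitC, hc, hs, List.modifyHead]

theorem splitOn_eq_splitC (d : Char) (l : List Char) :
    PySem.Chars.splitOn l [d] = splitC d l := by
  unfold PySem.Chars.splitOn
  rw [splitOn_go_spec d (l.length + 1) l [] [] (by omega)]
  cases hs : splitC d l with
  | nil => exact absurd hs (splitC_ne_nil d l)
  | cons a b => simp [List.modifyHead]

-- the head of split(' ') is the prefix before the first space
theorem splitC_head_eq_takeWhile (d : Char) (l : List Char) :
    (splitC d l).headD [] = l.takeWhile (· ≠ d) := by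
  induction l with
  | nil => simp [splitC]
  | cons c t ih =>
    by_cases hc : c = d
    · subst hc; simp [splitC, List.takeWhile_cons]
    · cases hs : splitC d t with
      | nil => exact absurd hs (splitC_ne_nil d t)
      | cons a b =>
        rw [hs] at ih
        simp only [List.headD_cons] at ih
        simp [splitC, hc, hs, List.takeWhile_cons, ih]

-- nesting split('>') then split('<') gives the single token stream splitD
theorem flatMap_splitC_eq_splitD (l : List Char) :
    (splitC '>' l).flatMap (splitC '<') = splitD l := by
  induction l with
  | nil => simp [splitC, splitD]
  | cons c t ih =>
    simp only [splitC, splitD]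
    by_cases hgt : c = '>'
    · subst hgt
      simp [splitC, List.flatMap_cons, ih]
    · cases hs : splitC '>' t with
      | nil => exact absurd hs (splitC_ne_nil _ t)
      | cons a b =>
        rw [hs] at ih
        by_cases hlt : c = '<'
        · subst hlt
          rw [if_neg hgt, if_pos (Or.inl rfl)]
          have hsp : splitC '<' ('<' :: a) = [] :: splitC '<' a := by simp [splitC]
          rw [List.modifyHead_cons, List.flatMap_cons, hsp, List.cons_append,
            ← List.flatMap_cons, ih]
        · have hcd : ¬ (c = '<' ∨ c = '>') := by tauto
          rw [if_neg hgt, if_neg hcd]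
          have hsp : splitC '<' (c :: a) = (splitC '<' a).modifyHead (c :: ·) := by
            simp [splitC, hlt]
          rw [List.modifyHead_cons, List.flatMap_cons, hsp,
            ← modifyHead_append_left _ _ _ (splitC_ne_nil '<' a), ← List.flatMap_cons, ih]

-- scanner = format-fold over the token stream
def Fmt (pieces : List (List Char)) : List Char :=
  (pieces.filter pvKeep).flatMap flushB

theorem modifyHead_nil_append (l : List (List Char)) :
    l.modifyHead (([] : List Char) ++ ·) = l := by
  cases l <;> simp [List.modifyHead]

theorem Fmt_cons (x : List Char) (xs : List (List Char)) :
    Fmt (x :: xs) = flushB x ++ Fmt xs := by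
  unfold Fmt
  by_cases h : pvKeep x
  · rw [List.filter_cons_of_pos h, List.flatMap_cons]
  · rw [List.filter_cons_of_neg (by simpa using h)]
    simp only [flushB, if_neg h, List.nil_append]

theorem scanB_spec (l : List Char) :
    ∀ (tok out : List Char),
      scanB l tok out = out ++ Fmt ((splitD l).modifyHead (tok ++ ·)) := by
  induction l with
  | nil =>
    intro tok out
    have h2 : (splitD []).modifyHead (tok ++ ·) = [tok] := by
      simp [splitD, List.modifyHead]
    simp only [scanB, h2, Fmt_cons]
    simp [Fmt]
  | cons c rest ih =>
    intro tok out
    by_cases hc : c = '<' ∨ c = '>'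
    · have h2 : (splitD (c :: rest)).modifyHead (tok ++ ·) = tok :: splitD rest := by
        simp [splitD, hc, List.modifyHead]
      simp only [scanB, if_pos hc, h2, Fmt_cons]
      rw [ih, modifyHead_nil_append, List.append_assoc]
    · have h2 : (splitD (c :: rest)).modifyHead (tok ++ ·)
          = (splitD rest).modifyHead ((tok ++ [c]) ++ ·) := by
        cases hs : splitD rest with
        | nil => exact absurd hs (splitD_ne_nil rest)
        | cons a b => simp [splitD, hc, hs, List.modifyHead]
      simp only [scanB, if_neg hc, h2]
      exact ih (tok ++ [c]) out

-- a kept token is nonempty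
theorem pvKeep_ne_nil (tag : List Char) (h : pvKeep tag = true) : tag ≠ [] := by
  intro he; subst he; simp [pvKeep, PySem.Chars.replace, PySem.Chars.replace.go] at h

-- on kept (hence nonempty) tokens A's and B's formatting agree
theorem fmtA_eq_flushB (tag : List Char) (h : pvKeep tag = true) : fmtA tag = flushB tag := by
  have hne := pvKeep_ne_nil tag h
  obtain h0 | ⟨ys, y, rfl⟩ := List.eq_nil_or_concat tag
  · exact absurd h0 hne
  rw [List.concat_eq_append] at h ⊢
  have hlen : (ys ++ [y]).length = ys.length + 1 := by simp
  have hget : PySem.List.pyGet? (ys ++ [y]) (-1) = some y := by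
    unfold PySem.List.pyGet? PySem.List.pyIdx?
    rw [hlen, if_neg (by norm_num), if_pos (by push_cast; omega)]
    simp
  have hend : PySem.Chars.endswith (ys ++ [y]) ['/'] = decide (y = '/') := by
    by_cases hy : y = '/'
    · subst hy
      simp only [decide_eq_true_eq, decide_true]
      exact (PySem.Chars.endswith_iff _ _).mpr ⟨ys, rfl⟩
    · simp only [hy, decide_false]
      cases hE : PySem.Chars.endswith (ys ++ [y]) ['/'] with
      | false => rfl
      | true =>
        obtain ⟨t, ht⟩ := (PySem.Chars.endswith_iff _ _).mp hE
        have := congrArg List.getLast? ht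
        simp at this
        exact absurd this.symm hy
  have hslice : PySem.List.slice (ys ++ [y]) none (some (-1)) = ys := by
    simp only [PySem.List.slice, PySem.List.clampIdx]
    norm_num
  rw [fmtA, flushB, if_pos h, hget, hend, hslice, splitOn_eq_splitC, splitC_head_eq_takeWhile]
  by_cases hy : y = '/'
  · simp [hy, List.dropLast_concat]
  · simp [hy]

-- A's tag list in filter/flatMap form
theorem fixA_tags (cs : List Char) :
    (PySem.Chars.splitOn cs ['>']).foldl
      (fun acc string =>
        (PySem.Chars.splitOn string ['<']).foldl
          (fun acc2 ss => if pvKeep ss then acc2 ++ [ss] else acc2) acc)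
      [] = (splitD cs).filter pvKeep := by
  have hinner : ∀ (str : List Char) (acc : List (List Char)),
      (PySem.Chars.splitOn str ['<']).foldl
        (fun acc2 ss => if pvKeep ss then acc2 ++ [ss] else acc2) acc
      = acc ++ (splitC '<' str).filter pvKeep := by
    intro str acc
    rw [splitOn_eq_splitC, PySem.List.foldl_append_if_eq_filter]
  rw [splitOn_eq_splitC]
  have houter : ∀ (ps : List (List Char)) (acc : List (List Char)),
      ps.foldl (fun acc string =>
        (PySem.Chars.splitOn string ['<']).foldl
          (fun acc2 ss => if pvKeep ss then acc2 ++ [ss] else acc2) acc) acc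
      = acc ++ (ps.flatMap (splitC '<')).filter pvKeep := by
    intro ps
    induction ps with
    | nil => intro acc; simp
    | cons p q ihq =>
      intro acc
      simp only [List.foldl_cons, List.flatMap_cons, List.filter_append]
      rw [hinner, ihq, List.append_assoc]
  rw [houter, flatMap_splitC_eq_splitD]
  simp

-- ===== VERDICT (by name: the statement is the Claim_ definition above) =====
theorem fix_x3d_str_spec : Claim_equal_fix_x3d_str := by
  intro s _
  unfold Spec_fix_x3d_str
  simp only [fix_x3d_str, fix_x3d_str_alt]
  congr 1
  rw [fixA_tags, PySem.List.foldl_append_eq_flatMap, scanB_spec, modifyHead_nil_append]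
  simp only [List.nil_append, Fmt]
  exact List.flatMap_congr (fun tag htag => fmtA_eq_flushB tag (List.of_mem_filter htag))
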